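-- pv_equiv track=rewrite | github.com/jgroc-de/mixed_projects | algorithm/linear_regression/src/stats.py | get_extremum
-- ===== SOURCE A (Python) =====
-- def get_extremum(data: list):
--     data_max = [data[0][0], data[0][1]]
--     data_min = [data[0][0], data[0][1]]
--     for item in data:
--         for i in range(0, 2):
--             if (item[i] > data_max[i]):
--                 data_max[i] = item[i]
--             if (item[i] < data_min[i]):
--                 data_min[i] = item[i]
--
--     return {'max': data_max, 'min': data_min}
-- ===== SOURCE B (Python) =====
-- def get_extremum(data: list):
--     col0 = [row[0] for row in data]
--     col1 = [row[1] for row in data]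
--     return {'max': [max(col0), max(col1)], 'min': [min(col0), min(col1)]}
-- ===== Notes on version B (the rewrite author's own statement) =====
-- stated objective: idiomatic
-- what changed: Replaces the interleaved single pass maintaining four indexed accumulators with building the two columns and reducing each with the builtins max/min.
import Mathlib
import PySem

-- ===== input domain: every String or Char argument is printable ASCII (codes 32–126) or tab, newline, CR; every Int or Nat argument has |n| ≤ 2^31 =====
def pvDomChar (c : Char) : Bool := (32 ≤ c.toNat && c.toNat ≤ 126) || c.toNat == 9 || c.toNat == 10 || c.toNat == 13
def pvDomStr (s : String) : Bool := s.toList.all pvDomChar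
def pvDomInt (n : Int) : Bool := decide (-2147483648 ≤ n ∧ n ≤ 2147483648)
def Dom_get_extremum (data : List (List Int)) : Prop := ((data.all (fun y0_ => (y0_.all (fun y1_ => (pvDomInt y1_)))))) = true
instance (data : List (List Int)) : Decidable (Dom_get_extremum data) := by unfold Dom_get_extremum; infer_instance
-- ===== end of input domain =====

-- B builds the two columns and reduces each with the builtins max/min, instead of A's
-- interleaved single pass over four indexed accumulators.

-- ===== PORT A =====
-- body of 'for i in range(0, 2)': the two ifs on data_max[i] / data_min[i]
def gxInner (item : List Int) (st : List Int × List Int) (i : Int) : List Int × List Int :=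
  let v := PySem.List.pyGetD item i 0
  let dmax := if v > PySem.List.pyGetD st.1 i 0 then PySem.List.pySetD st.1 i v else st.1
  let dmin := if v < PySem.List.pyGetD st.2 i 0 then PySem.List.pySetD st.2 i v else st.2
  (dmax, dmin)

def get_extremum (data : List (List Int)) : List (String × List Int) :=
  let first := PySem.List.pyGetD data 0 []
  let a := PySem.List.pyGetD first 0 0
  let b := PySem.List.pyGetD first 1 0
  let r := data.foldl (fun st item => (PySem.List.pyRange 0 2 1).foldl (gxInner item) st) ([a, b], [a, b])
  [("max", r.1), ("min", r.2)]

-- ===== PORT B =====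
def get_extremum_alt (data : List (List Int)) : List (String × List Int) :=
  let col0 := data.map (fun row => PySem.List.pyGetD row 0 0)
  let col1 := data.map (fun row => PySem.List.pyGetD row 1 0)
  [("max", [(PySem.List.max? col0 (fun y => y)).getD 0, (PySem.List.max? col1 (fun y => y)).getD 0]),
   ("min", [(PySem.List.min? col0 (fun y => y)).getD 0, (PySem.List.min? col1 (fun y => y)).getD 0])]

-- ===== PRECONDITION & SPEC =====
-- A raises IndexError on empty data or on any row shorter than 2 (B raises ValueError/IndexError there too).
def Pre_get_extremum (data : List (List Int)) : Prop :=
  data ≠ [] ∧ ∀ row ∈ data, 2 ≤ row.length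
instance (data : List (List Int)) : Decidable (Pre_get_extremum data) := by unfold Pre_get_extremum; infer_instance
def pvWitness_get_extremum : List (List Int) := [[3, -1], [0, 7]]

def Spec_get_extremum (data : List (List Int)) (out : List (String × List Int)) : Prop := out = get_extremum_alt data
instance (data : List (List Int)) (out : List (String × List Int)) : Decidable (Spec_get_extremum data out) := by unfold Spec_get_extremum; infer_instance

-- ===== CLAIM (what is proved, stated in full; the proofs are below) =====
def Claim_equal_get_extremum : Prop := ∀ (data : List (List Int)), Dom_get_extremum data → Pre_get_extremum data → Spec_get_extremum data (get_extremum data)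

-- ===== LEMMAS AND PROOFS =====

-- One step of A's outer loop, on a row of length ≥ 2, with 2-element accumulators.
lemma gxInner_step (item : List Int) (x0 x1 y0 y1 : Int) (h : 2 ≤ item.length) :
    (PySem.List.pyRange 0 2 1).foldl (gxInner item) ([x0, x1], [y0, y1]) =
      ([max x0 (item.getD 0 0), max x1 (item.getD 1 0)],
       [min y0 (item.getD 0 0), min y1 (item.getD 1 0)]) := by
  have hr : PySem.List.pyRange 0 2 1 = [((0:Nat):Int), ((1:Nat):Int)] := by decide
  rw [hr]
  obtain ⟨a, rest, rfl⟩ : ∃ a rest, item = a :: rest := by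
    cases item with | nil => simp at h | cons a rest => exact ⟨a, rest, rfl⟩
  obtain ⟨b, rest2, rfl⟩ : ∃ b rest2, rest = b :: rest2 := by
    cases rest with | nil => simp at h | cons b r => exact ⟨b, r, rfl⟩
  simp only [List.foldl, gxInner, PySem.List.pyGetD_natCast, PySem.List.pySetD_natCast]
  simp only [List.getD_cons_zero, List.getD_cons_succ, List.set_cons_zero]
  split_ifs <;> simp_all <;> omega

-- A's fold computes componentwise running max/min over the two columns.
lemma gxFold (data : List (List Int)) (x0 x1 y0 y1 : Int)
    (h : ∀ row ∈ data, 2 ≤ row.length) :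
    data.foldl (fun st item => (PySem.List.pyRange 0 2 1).foldl (gxInner item) st) ([x0, x1], [y0, y1]) =
      ([(data.map (fun row => row.getD 0 0)).foldl max x0,
        (data.map (fun row => row.getD 1 0)).foldl max x1],
       [(data.map (fun row => row.getD 0 0)).foldl min y0,
        (data.map (fun row => row.getD 1 0)).foldl min y1]) := by
  induction data generalizing x0 x1 y0 y1 with
  | nil => simp
  | cons row t ih =>
      have hr : 2 ≤ row.length := h row (by simp)
      simp only [List.foldl_cons, List.map_cons]
      rw [gxInner_step row x0 x1 y0 y1 hr]
      exact ih _ _ _ _ (fun r hrm => h r (by simp [hrm]))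

-- ===== VERDICT (by name: the statement is the Claim_ definition above) =====
theorem get_extremum_spec : Claim_equal_get_extremum := by
  intro data _ hpre
  obtain ⟨hne, hlen⟩ := hpre
  obtain ⟨first, t, rfl⟩ : ∃ f t, data = f :: t := by
    cases data with | nil => exact absurd rfl hne | cons f t => exact ⟨f, t, rfl⟩
  unfold Spec_get_extremum get_extremum get_extremum_alt
  have hf : 2 ≤ first.length := hlen first (by simp)
  obtain ⟨a, rest, rfl⟩ : ∃ a rest, first = a :: rest := by
    cases first with | nil => simp at hf | cons a r => exact ⟨a, r, rfl⟩
  obtain ⟨b, rest2, rfl⟩ : ∃ b rest2, rest = b :: rest2 := by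
    cases rest with | nil => simp at hf | cons b r => exact ⟨b, r, rfl⟩
  have hget : ∀ (row : List Int), row ∈ (a :: b :: rest2) :: t →
      PySem.List.pyGetD row 0 0 = row.getD 0 0 ∧ PySem.List.pyGetD row 1 0 = row.getD 1 0 := by
    intro row hrow
    have h2 : 2 ≤ row.length := hlen row hrow
    obtain ⟨u, r1, rfl⟩ : ∃ u r1, row = u :: r1 := by
      cases row with | nil => simp at h2 | cons u r1 => exact ⟨u, r1, rfl⟩
    obtain ⟨v, r2, rfl⟩ : ∃ v r2, r1 = v :: r2 := by
      cases r1 with | nil => simp at h2 | cons v r2 => exact ⟨v, r2, rfl⟩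
    constructor <;> simp [PySem.List.pyGetD]
  have hmap0 : ((a :: b :: rest2) :: t).map (fun row => PySem.List.pyGetD row 0 0) =
      ((a :: b :: rest2) :: t).map (fun row => row.getD 0 0) :=
    List.map_congr_left (fun row hrow => (hget row hrow).1)
  have hmap1 : ((a :: b :: rest2) :: t).map (fun row => PySem.List.pyGetD row 1 0) =
      ((a :: b :: rest2) :: t).map (fun row => row.getD 1 0) :=
    List.map_congr_left (fun row hrow => (hget row hrow).2)
  simp only [hmap0, hmap1]
  rw [show PySem.List.pyGetD ((a :: b :: rest2) :: t) 0 [] = a :: b :: rest2 from by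
        simp [PySem.List.pyGetD]]
  rw [show PySem.List.pyGetD (a :: b :: rest2) 0 0 = a from by
        simp [PySem.List.pyGetD]]
  rw [show PySem.List.pyGetD (a :: b :: rest2) 1 0 = b from by
        simp [PySem.List.pyGetD]]
  rw [gxFold ((a :: b :: rest2) :: t) a b a b hlen]
  simp only [List.map_cons, PySem.List.max?_id_cons, PySem.List.min?_id_cons]
  simp [List.foldl_cons, max_self, min_self]
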